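-- pv_equiv track=rewrite | github.com/kevin-ch-day/ScytaleDroid | scytaledroid/DeviceAnalysis/inventory.py | _partition_breakdown
-- ===== SOURCE A (Python) =====
-- from collections import Counter
-- from typing import Callable, Dict, Iterable, List, Optional, Sequence, Tuple
--
-- _PARTITION_ORDER = [
--     "Data (/data)",
--     "Product (/product)",
--     "System (/system, /system_ext)",
--     "Apex (/apex)",
--     "Vendor (/vendor)",
--     "Other",
--     "Unknown",
-- ]
--
-- def _partition_breakdown(rows: List[Dict[str, object]]) -> List[tuple[str, str]]:
--     counts = Counter(str(entry.get("partition") or "Other") for entry in rows)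
--     ordered: List[tuple[str, str]] = []
--     for label in _PARTITION_ORDER:
--         value = counts.get(label, 0)
--         if value:
--             ordered.append((label, str(value)))
--     for label, value in counts.items():
--         if label not in _PARTITION_ORDER and value:
--             ordered.append((label, str(value)))
--     return ordered
-- ===== SOURCE B (Python) =====
-- from collections import Counter
-- from typing import Dict, List
--
-- _PARTITION_ORDER = [
--     "Data (/data)",
--     "Product (/product)",
--     "System (/system, /system_ext)",
--     "Apex (/apex)",
--     "Vendor (/vendor)",
--     "Other",
--     "Unknown",
-- ]
--
-- def _partition_breakdown(rows: List[Dict[str, object]]) -> List[tuple[str, str]]: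
--     counts = Counter(str(entry.get("partition") or "Other") for entry in rows)
--     rank = {label: index for index, label in enumerate(_PARTITION_ORDER)}
--     sentinel = len(_PARTITION_ORDER)
--     items = [(label, str(value)) for label, value in counts.items()]
--     items.sort(key=lambda item: rank.get(item[0], sentinel))
--     return items
-- ===== Notes on version B (the rewrite author's own statement) =====
-- stated objective: idiomatic
-- what changed: Replaces A's two-phase ordering (a scan over the fixed priority list with per-label dict lookups, then a second scan over the counter for leftover labels) by a single stable sort of the counter's items under a rank map that sends each priority label to its index and every other label to one sentinel rank.
import Mathlib
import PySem

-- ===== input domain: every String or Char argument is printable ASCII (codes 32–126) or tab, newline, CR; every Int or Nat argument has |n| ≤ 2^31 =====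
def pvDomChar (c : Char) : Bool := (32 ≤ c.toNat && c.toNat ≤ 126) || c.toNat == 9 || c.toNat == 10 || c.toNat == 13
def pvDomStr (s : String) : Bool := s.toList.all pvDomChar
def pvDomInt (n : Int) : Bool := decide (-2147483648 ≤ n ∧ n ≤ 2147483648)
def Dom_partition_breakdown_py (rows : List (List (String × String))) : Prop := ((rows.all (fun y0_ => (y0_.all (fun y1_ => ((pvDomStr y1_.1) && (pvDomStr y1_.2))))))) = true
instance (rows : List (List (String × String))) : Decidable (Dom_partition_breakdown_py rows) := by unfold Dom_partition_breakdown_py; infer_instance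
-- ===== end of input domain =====

-- B replaces A's two-phase ordering (priority-list scan with dict lookups, then a second
-- scan for leftover labels) by one stable sort of the counter's items under a rank map;
-- objective: idiomatic. Proved: same return value on every input.

-- ===== PORT A =====
-- _PARTITION_ORDER (module constant)
def pvOrder : List String :=
  ["Data (/data)", "Product (/product)", "System (/system, /system_ext)",
   "Apex (/apex)", "Vendor (/vendor)", "Other", "Unknown"]

def pvLabel (entry : List (String × String)) : String :=
  match (PySem.Dict.mk entry).get? "partition" with
  | none => "Other"
  | some s => if s = "" then "Other" else s

def partition_breakdown_py (rows : List (List (String × String))) : List (String × String) :=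
  let counts := PySem.Dict.counter (rows.map (fun entry => pvLabel entry))
  let ordered := pvOrder.foldl
    (fun acc label =>
      if counts.getD label 0 ≠ 0 then acc ++ [(label, PySem.Int.toStr (counts.getD label 0))] else acc)
    []
  counts.items.foldl
    (fun acc p =>
      if p.1 ∉ pvOrder ∧ p.2 ≠ 0 then acc ++ [(p.1, PySem.Int.toStr p.2)] else acc)
    ordered

-- ===== PORT B =====
def partition_breakdown_py_alt (rows : List (List (String × String))) : List (String × String) :=
  let counts := PySem.Dict.counter (rows.map (fun entry => pvLabel entry))
  let rank := (PySem.List.enumerate pvOrder).foldl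
    (fun d p => d.insert p.2 p.1) PySem.Dict.empty
  let sentinel : Int := (pvOrder.length : Int)
  let items := counts.items.map (fun p => (p.1, PySem.Int.toStr p.2))
  PySem.List.sorted items (fun item => rank.getD item.1 sentinel) false


-- ===== PRECONDITION & SPEC =====
def Spec_partition_breakdown_py (rows : List (List (String × String))) (out : List (String × String)) : Prop := out = partition_breakdown_py_alt rows
instance (rows : List (List (String × String))) (out : List (String × String)) : Decidable (Spec_partition_breakdown_py rows out) := by unfold Spec_partition_breakdown_py; infer_instance

-- ===== CLAIM (what is proved, stated in full; the proofs are below) =====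
def Claim_equal_partition_breakdown_py : Prop := ∀ (rows : List (List (String × String))), Dom_partition_breakdown_py rows → Spec_partition_breakdown_py rows (partition_breakdown_py rows)

-- ===== LEMMAS AND PROOFS =====

theorem insertBy_append {α : Type} (before : α → α → Bool) (x : α) (A B : List α)
    (hA : ∀ y ∈ A, before x y = false) :
    PySem.List.insertBy before x (A ++ B) = A ++ PySem.List.insertBy before x B := by
  induction A with
  | nil => simp
  | cons a A ih =>
    simp only [List.cons_append, PySem.List.insertBy, hA a (by simp), Bool.false_eq_true, if_false]
    rw [ih (fun y hy => hA y (by simp [hy]))]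

theorem insertBy_front {α : Type} (before : α → α → Bool) (x : α) (B : List α)
    (hB : ∀ y ∈ B, before x y = true) :
    PySem.List.insertBy before x B = x :: B := by
  cases B with
  | nil => simp [PySem.List.insertBy]
  | cons b B => simp [PySem.List.insertBy, hB b (by simp)]

theorem stable_sort_buckets {α : Type} (key : α → Int) (n : Nat) (l : List α)
    (h : ∀ y ∈ l, ∃ r : Nat, r < n ∧ key y = r) :
    PySem.List.sorted l key false =
      (List.range n).flatMap (fun (r : Nat) => l.filter (fun y => key y = (r : Int))) := by
  induction l using List.reverseRecOn with
  | nil => simp [PySem.List.sorted]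
  | append_singleton l x ih =>
    obtain ⟨r0, hr0n, hr0⟩ := h x (by simp)
    have hl : ∀ y ∈ l, ∃ r : Nat, r < n ∧ key y = r := fun y hy => h y (by simp [hy])
    have hsorted : PySem.List.sorted (l ++ [x]) key false
        = PySem.List.insertBy (fun a b => decide (key a < key b)) x (PySem.List.sorted l key false) := by
      simp [PySem.List.sorted, List.foldl_append]
    rw [hsorted, ih hl]
    have hsplit : List.range n = List.range (r0+1) ++ (List.range (n - (r0+1))).map ((r0+1) + ·) := by
      rw [← List.range_add]; congr 1; omega
    rw [hsplit]
    simp only [List.flatMap_append]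
    rw [insertBy_append (hA := ?_)]
    · rw [insertBy_front (hB := ?_)]
      · rw [List.range_succ]
        simp only [List.flatMap_append, List.flatMap_cons, List.flatMap_nil, List.append_nil]
        have h1 : (List.range r0).flatMap (fun (r : Nat) => (l ++ [x]).filter (fun y => key y = (r : Int)))
            = (List.range r0).flatMap (fun (r : Nat) => l.filter (fun y => key y = (r : Int))) := by
          apply List.flatMap_congr
          intro r hr
          simp only [List.filter_append, List.filter_cons, List.filter_nil]
          have : ¬ (key x = (r : Int)) := by
            simp only [List.mem_range] at hr; rw [hr0]; intro hc
            have : r0 = r := by exact_mod_cast hc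
            omega
          simp [this]
        have h2 : ((List.range (n - (r0+1))).map ((r0+1) + ·)).flatMap
              (fun (r : Nat) => (l ++ [x]).filter (fun y => key y = (r : Int)))
            = ((List.range (n - (r0+1))).map ((r0+1) + ·)).flatMap
              (fun (r : Nat) => l.filter (fun y => key y = (r : Int))) := by
          apply List.flatMap_congr
          intro r hr
          simp only [List.filter_append, List.filter_cons, List.filter_nil]
          have : ¬ (key x = (r : Int)) := by
            simp only [List.mem_map, List.mem_range] at hr
            obtain ⟨i, _, hi⟩ := hr
            rw [hr0]; intro hc
            have : r0 = r := by exact_mod_cast hc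
            omega
          simp [this]
        have h3 : (l ++ [x]).filter (fun y => key y = (r0 : Int))
            = l.filter (fun y => key y = (r0 : Int)) ++ [x] := by
          simp [List.filter_append, hr0]
        rw [h1, h2, h3]
        simp
      · intro y hy
        simp only [List.mem_flatMap, List.mem_map, List.mem_range, List.mem_filter] at hy
        obtain ⟨r, ⟨i, hi, hir⟩, _, hky⟩ := hy
        simp only [decide_eq_true_eq] at hky
        show decide (key x < key y) = true
        simp only [decide_eq_true_eq]
        rw [hr0, hky]; subst hir; push_cast; omega
    · intro y hy
      simp only [List.mem_flatMap, List.mem_range, List.mem_filter] at hy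
      obtain ⟨r, hr, _, hky⟩ := hy
      simp only [decide_eq_true_eq] at hky
      show decide (key x < key y) = false
      simp only [decide_eq_false_iff_not, not_lt]
      rw [hr0, hky]; omega


-- the rank dictionary B builds, as a literal
theorem rankFold_eq :
    (PySem.List.enumerate pvOrder).foldl (fun d p => d.insert p.2 p.1) PySem.Dict.empty
      = PySem.Dict.mk [("Data (/data)", 0), ("Product (/product)", 1),
          ("System (/system, /system_ext)", 2), ("Apex (/apex)", 3),
          ("Vendor (/vendor)", 4), ("Other", 5), ("Unknown", 6)] := by
  decide

def pvRnk (k : String) : Int :=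
  (PySem.Dict.mk [("Data (/data)", (0:Int)), ("Product (/product)", 1),
      ("System (/system, /system_ext)", 2), ("Apex (/apex)", 3),
      ("Vendor (/vendor)", 4), ("Other", 5), ("Unknown", 6)]).getD k 7

theorem pvRnk_eq (k : String) : pvRnk k =
    if k = "Data (/data)" then 0 else if k = "Product (/product)" then 1
    else if k = "System (/system, /system_ext)" then 2 else if k = "Apex (/apex)" then 3
    else if k = "Vendor (/vendor)" then 4 else if k = "Other" then 5
    else if k = "Unknown" then 6 else 7 := by
  by_cases h1 : k = "Data (/data)"
  · subst h1; decide
  by_cases h2 : k = "Product (/product)"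
  · subst h2; decide
  by_cases h3 : k = "System (/system, /system_ext)"
  · subst h3; decide
  by_cases h4 : k = "Apex (/apex)"
  · subst h4; decide
  by_cases h5 : k = "Vendor (/vendor)"
  · subst h5; decide
  by_cases h6 : k = "Other"
  · subst h6; decide
  by_cases h7 : k = "Unknown"
  · subst h7; decide
  simp [pvRnk, PySem.Dict.getD_eq_get?_getD, PySem.Dict.get?,
    beq_iff_eq, Ne.symm h1, Ne.symm h2, Ne.symm h3, Ne.symm h4, Ne.symm h5, Ne.symm h6, Ne.symm h7, h1, h2, h3, h4, h5, h6, h7]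

theorem pvRnk_bound (k : String) : ∃ r : Nat, r < 8 ∧ pvRnk k = r := by
  rw [pvRnk_eq k]
  split_ifs
  · exact ⟨0, by omega, rfl⟩
  · exact ⟨1, by omega, rfl⟩
  · exact ⟨2, by omega, rfl⟩
  · exact ⟨3, by omega, rfl⟩
  · exact ⟨4, by omega, rfl⟩
  · exact ⟨5, by omega, rfl⟩
  · exact ⟨6, by omega, rfl⟩
  · exact ⟨7, by omega, rfl⟩

theorem pvRnk_seven_iff (k : String) : pvRnk k = 7 ↔ k ∉ pvOrder := by
  rw [pvRnk_eq k]
  simp only [pvOrder, List.mem_cons, List.not_mem_nil]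
  split_ifs <;> simp_all

theorem foldl_append_ite {α β : Type} (p : α → Prop) [DecidablePred p] (f : α → β)
    (l : List α) (acc : List β) :
    l.foldl (fun acc x => if p x then acc ++ [f x] else acc) acc
      = acc ++ (l.filter (fun x => decide (p x))).map f := by
  have h := PySem.List.foldl_append_if (fun x => decide (p x)) f l acc
  simpa using h

theorem filter_map_eq_flatMap {α β : Type} (p : α → Prop) [DecidablePred p] (f : α → β)
    (l : List α) :
    (l.filter (fun x => decide (p x))).map f = l.flatMap (fun a => if p a then [f a] else []) := by
  induction l with
  | nil => rfl
  | cons a l ih =>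
    by_cases h : p a <;> simp [h, ih]

theorem filter_eq_singleton_of_nodup {α : Type} [DecidableEq α] (s : List α) (hnd : s.Nodup)
    (a : α) : s.filter (fun k => decide (k = a)) = if a ∈ s then [a] else [] := by
  induction s with
  | nil => simp
  | cons b s ih =>
    rw [List.nodup_cons] at hnd
    obtain ⟨hb, hnd⟩ := hnd
    by_cases h : b = a
    · subst h
      have hns : b ∉ s := hb
      rw [List.filter_cons]
      simp only [decide_eq_true_eq, List.mem_cons, true_or]
      have : List.filter (fun k => decide (k = b)) s = [] := by
        apply List.filter_eq_nil_iff.mpr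
        intro x hx
        simp only [decide_eq_true_eq]
        rintro rfl
        exact hns hx
      simp [this]
    · rw [List.filter_cons]
      simp only [decide_eq_true_eq, h, if_false]
      rw [ih hnd]
      by_cases hm : a ∈ s
      · simp [hm]
      · have hnot : a ∉ b :: s := by
          simp only [List.mem_cons, not_or]
          exact ⟨fun hc => h hc.symm, hm⟩
        simp [hm, hnot]

theorem bucketA (xs : List String) (L : String) (r : Int)
    (hiff : ∀ k, pvRnk k = r ↔ k = L) :
    ((PySem.Dict.counter xs).items.map (fun p => (p.1, PySem.Int.toStr p.2))).filter
        (fun q => decide (pvRnk q.1 = r))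
      = if (PySem.Dict.counter xs).getD L 0 ≠ 0 then
          [(L, PySem.Int.toStr ((PySem.Dict.counter xs).getD L 0))] else [] := by
  rw [PySem.Dict.items_counter]
  rw [List.map_map, List.filter_map]
  have hc : ((fun q : String × String => decide (pvRnk q.1 = (r : Int)))
      ∘ ((fun p : String × Int => (p.1, PySem.Int.toStr p.2)) ∘ fun k => (k, (List.count k xs : Int))))
      = fun k => decide (k = L) := by
    funext k; simp [hiff k]
  rw [hc, filter_eq_singleton_of_nodup _ (PySem.Set.nodup_ofList xs) L]
  rw [PySem.Dict.getD_counter]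
  by_cases hm : L ∈ PySem.Set.ofList xs
  · have : L ∈ xs := (PySem.Set.mem_ofList xs L).mp hm
    have hcnt : (List.count L xs : Int) ≠ 0 := by
      have := List.count_pos_iff.mpr this
      omega
    rw [if_pos hm, if_pos hcnt]
    simp
  · have : L ∉ xs := fun h => hm ((PySem.Set.mem_ofList xs L).mpr h)
    have hcnt : (List.count L xs : Int) = 0 := by
      simp [List.count_eq_zero.mpr this]
    rw [if_neg hm, if_neg (by simp [hcnt])]
    simp

theorem bucket7 (xs : List String) :
    ((PySem.Dict.counter xs).items.map (fun p => (p.1, PySem.Int.toStr p.2))).filter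
        (fun q => decide (pvRnk q.1 = (7 : Int)))
      = ((PySem.Dict.counter xs).items.filter
          (fun p => decide (p.1 ∉ pvOrder ∧ p.2 ≠ 0))).map (fun p => (p.1, PySem.Int.toStr p.2)) := by
  rw [List.filter_map]
  congr 1
  rw [PySem.Dict.items_counter]
  apply List.filter_congr
  intro p hp
  simp only [List.mem_map] at hp
  obtain ⟨k, hk, rfl⟩ := hp
  have hkxs : k ∈ xs := (PySem.Set.mem_ofList xs k).mp hk
  have hcnt : (List.count k xs : Int) ≠ 0 := by
    have := List.count_pos_iff.mpr hkxs
    omega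
  simp only [Function.comp, pvRnk_seven_iff, decide_eq_decide]
  constructor
  · intro h; exact ⟨h, by exact_mod_cast hcnt⟩
  · intro h; exact h.1

theorem pvRnk_iff0 (k : String) : pvRnk k = (0 : Int) ↔ k = "Data (/data)" := by
  rw [pvRnk_eq k]; split_ifs <;> simp_all
theorem pvRnk_iff1 (k : String) : pvRnk k = (1 : Int) ↔ k = "Product (/product)" := by
  rw [pvRnk_eq k]; split_ifs <;> simp_all
theorem pvRnk_iff2 (k : String) : pvRnk k = (2 : Int) ↔ k = "System (/system, /system_ext)" := by
  rw [pvRnk_eq k]; split_ifs <;> simp_all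
theorem pvRnk_iff3 (k : String) : pvRnk k = (3 : Int) ↔ k = "Apex (/apex)" := by
  rw [pvRnk_eq k]; split_ifs <;> simp_all
theorem pvRnk_iff4 (k : String) : pvRnk k = (4 : Int) ↔ k = "Vendor (/vendor)" := by
  rw [pvRnk_eq k]; split_ifs <;> simp_all
theorem pvRnk_iff5 (k : String) : pvRnk k = (5 : Int) ↔ k = "Other" := by
  rw [pvRnk_eq k]; split_ifs <;> simp_all
theorem pvRnk_iff6 (k : String) : pvRnk k = (6 : Int) ↔ k = "Unknown" := by
  rw [pvRnk_eq k]; split_ifs <;> simp_all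

theorem ab_eq (rows : List (List (String × String))) :
    partition_breakdown_py rows = partition_breakdown_py_alt rows := by
  simp only [partition_breakdown_py, partition_breakdown_py_alt]
  have hkey : (fun item : String × String =>
      (((PySem.List.enumerate pvOrder).foldl (fun d p => d.insert p.2 p.1)
          PySem.Dict.empty).getD item.1 ((pvOrder.length : Nat) : Int)))
      = fun item : String × String => pvRnk item.1 := by
    funext item
    rw [rankFold_eq]
    simp [pvRnk, pvOrder]
  rw [hkey]
  rw [stable_sort_buckets (fun item : String × String => pvRnk item.1) 8 _
    (fun y _ => pvRnk_bound y.1)]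
  rw [foldl_append_ite (p := fun p : String × Int => p.1 ∉ pvOrder ∧ p.2 ≠ 0)
    (f := fun p : String × Int => (p.1, PySem.Int.toStr p.2))]
  rw [foldl_append_ite
    (p := fun label =>
      (PySem.Dict.counter (rows.map (fun entry => pvLabel entry))).getD label 0 ≠ 0)
    (f := fun label => (label,
      PySem.Int.toStr ((PySem.Dict.counter (rows.map (fun entry => pvLabel entry))).getD label 0)))]
  rw [List.nil_append, filter_map_eq_flatMap]
  rw [show List.range 8 = [0, 1, 2, 3, 4, 5, 6, 7] from rfl]
  simp only [List.flatMap_cons, List.flatMap_nil, List.append_nil]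
  push_cast
  rw [bucketA _ _ 0 pvRnk_iff0, bucketA _ _ 1 pvRnk_iff1, bucketA _ _ 2 pvRnk_iff2,
    bucketA _ _ 3 pvRnk_iff3, bucketA _ _ 4 pvRnk_iff4, bucketA _ _ 5 pvRnk_iff5,
    bucketA _ _ 6 pvRnk_iff6, bucket7]
  simp only [pvOrder, List.flatMap_cons, List.flatMap_nil, List.append_nil, List.append_assoc]

-- ===== VERDICT (by name: the statement is the Claim_ definition above) =====
theorem partition_breakdown_py_spec : Claim_equal_partition_breakdown_py := by
  intro rows _
  unfold Spec_partition_breakdown_py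
  exact ab_eq rows
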